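-- pv_equiv track=rewrite | github.com/tdinelli/diffPLOG2TROE | diffPLOG2TROE/chemkin/interpreter.py | identify_plog_reactions
-- ===== SOURCE A (Python) =====
-- def identify_plog_reactions(content: list) -> tuple:
--     """
--     Function needed to parse the entire reaction sets and extract only the PLOG reactions.
--
--     Args:
--         content (list): list of strings containing all the reactions whithin the mechanism.
--
--     Returns:
--         (tuple): a list of all the PLOG reactions, the indices of the plog reactions, the indices of all the reactions.
--     """
--     plog_reactions = []
--     indices_of_reactions = []
--     indices_of_plog_reactions = []
--     for i, line in enumerate(content):
--         if ("=" in line or "<=>" in line or "=>" in line):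
--             indices_of_reactions.append(i)
--             is_a_plog = i != len(content) - 1 and "PLOG" in content[i+1]
--             if is_a_plog:
--                 indices_of_plog_reactions.append(i)
--
--     # Once I have the index of the PLOG reactions and the index of all the reactions available inside the mechanism i
--     # extract the blocks
--     n_reactions = len(indices_of_reactions)
--     for i, idx in enumerate(indices_of_plog_reactions):
--         idx_current = indices_of_reactions.index(idx)
--         idx_next = indices_of_reactions[idx_current + 1] if idx_current + 1 < n_reactions else len(content)
--         plog_reactions.append(content[idx:idx_next])
--
--     return (plog_reactions, indices_of_plog_reactions, indices_of_reactions, n_reactions)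
-- ===== SOURCE B (Python) =====
-- def identify_plog_reactions(content: list) -> tuple:
--     """Single pass: close the pending PLOG block at the next reaction line."""
--     plog_reactions = []
--     indices_of_reactions = []
--     indices_of_plog_reactions = []
--     pending = None
--     n = len(content)
--     for i, line in enumerate(content):
--         if "=" in line:
--             if pending is not None:
--                 plog_reactions.append(content[pending:i])
--                 pending = None
--             indices_of_reactions.append(i)
--             if i != n - 1 and "PLOG" in content[i + 1]:
--                 indices_of_plog_reactions.append(i)
--                 pending = i
--     if pending is not None:
--         plog_reactions.append(content[pending:n])
--     return (plog_reactions, indices_of_plog_reactions, indices_of_reactions, len(indices_of_reactions))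
-- ===== Notes on version B (the rewrite author's own statement) =====
-- stated objective: alternative
-- what changed: Replaced A's two passes (collect indices, then for each PLOG index re-find its position with list.index and look up the next reaction index) by a single pass over enumerate(content) that keeps a pending PLOG start and closes the block at the next reaction line.
import Mathlib
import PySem

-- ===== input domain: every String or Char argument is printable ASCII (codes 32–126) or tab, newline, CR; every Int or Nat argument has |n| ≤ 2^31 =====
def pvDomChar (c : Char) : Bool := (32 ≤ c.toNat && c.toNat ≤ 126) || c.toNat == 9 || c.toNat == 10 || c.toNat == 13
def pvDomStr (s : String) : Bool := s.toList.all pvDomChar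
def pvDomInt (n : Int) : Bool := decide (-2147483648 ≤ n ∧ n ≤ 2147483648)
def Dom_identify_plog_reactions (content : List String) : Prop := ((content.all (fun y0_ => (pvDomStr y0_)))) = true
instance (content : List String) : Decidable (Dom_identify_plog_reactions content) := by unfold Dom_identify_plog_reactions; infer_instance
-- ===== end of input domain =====

-- B replaces A's two passes (index scan + re-lookup via list.index) by one pass that closes a
-- pending PLOG block at the next reaction line; objective: alternative/simpler single-pass structure.

-- ===== PORT A =====
def pvIsReactionA (line : String) : Bool :=
  PySem.Str.isIn "=" line || PySem.Str.isIn "<=>" line || PySem.Str.isIn "=>" line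

def pvALoop1 (content : List String) (n : Nat) :
    Nat → List String → List Int × List Int → List Int × List Int
  | _, [], st => st
  | i, line :: rest, (ir, ipr) =>
    if pvIsReactionA line then
      let ir' := ir ++ [(i : Int)]
      let isPlog : Bool :=
        (i != n - 1) && PySem.Str.isIn "PLOG" ((PySem.List.pyGet? content ((i : Int) + 1)).getD "")
      pvALoop1 content n (i+1) rest (ir', if isPlog then ipr ++ [(i : Int)] else ipr)
    else pvALoop1 content n (i+1) rest (ir, ipr)

def pvALoop2 (content : List String) (ir : List Int) (nR : Nat) :
    List Int → List (List String) → List (List String)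
  | [], acc => acc
  | idx :: restP, acc =>
    match PySem.List.index? ir idx with
    | none => pvALoop2 content ir nR restP acc
      -- unreachable: every plog index occurs in ir; Python's .index would raise ValueError
    | some j =>
      let idxNext : Int :=
        if j + 1 < nR then (PySem.List.pyGet? ir ((j : Int) + 1)).getD 0 else (content.length : Int)
      pvALoop2 content ir nR restP (acc ++ [PySem.List.slice content (some idx) (some idxNext)])

def identify_plog_reactions (content : List String) :
    List (List String) × List Int × List Int × Int :=
  let st := pvALoop1 content content.length 0 content ([], [])
  let nR := st.1.length
  (pvALoop2 content st.1 nR st.2 [], st.2, st.1, (nR : Int))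

-- ===== PORT B =====
def pvBLoop (content : List String) (n : Nat) :
    Nat → List String → List (List String) × List Int × List Int × Option Nat →
      List (List String) × List Int × List Int × Option Nat
  | _, [], st => st
  | i, line :: rest, (bs, ipr, ir, pend) =>
    if PySem.Str.isIn "=" line then
      let bs' := match pend with
        | some s => bs ++ [PySem.List.slice content (some (s : Int)) (some (i : Int))]
        | none => bs
      let ir' := ir ++ [(i : Int)]
      if (i != n - 1) && PySem.Str.isIn "PLOG" ((PySem.List.pyGet? content ((i : Int) + 1)).getD "") then
        pvBLoop content n (i+1) rest (bs', ipr ++ [(i : Int)], ir', some i)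
      else
        pvBLoop content n (i+1) rest (bs', ipr, ir', none)
    else pvBLoop content n (i+1) rest (bs, ipr, ir, pend)

def identify_plog_reactions_alt (content : List String) :
    List (List String) × List Int × List Int × Int :=
  let st := pvBLoop content content.length 0 content ([], [], [], none)
  (st.1 ++ (match st.2.2.2 with
            | some s => [PySem.List.slice content (some (s : Int)) (some (content.length : Int))]
            | none => []),
   st.2.1, st.2.2.1, (st.2.2.1.length : Int))

-- ===== PRECONDITION & SPEC =====
def Spec_identify_plog_reactions (content : List String) (out : List (List String) × List Int × List Int × Int) : Prop := out = identify_plog_reactions_alt content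
instance (content : List String) (out : List (List String) × List Int × List Int × Int) : Decidable (Spec_identify_plog_reactions content out) := by unfold Spec_identify_plog_reactions; infer_instance

-- ===== CLAIM (what is proved, stated in full; the proofs are below) =====
def Claim_equal_identify_plog_reactions : Prop := ∀ (content : List String), Dom_identify_plog_reactions content → Spec_identify_plog_reactions content (identify_plog_reactions content)

-- ===== LEMMAS AND PROOFS =====

-- middle characterisation: reaction indices, plog indices, block boundaries
def pvFlag (content : List String) (i : Nat) : Bool := pvIsReactionA (content.getD i "")

def pvPl (content : List String) (i : Nat) : Bool :=
  decide (i + 1 < content.length) && PySem.Str.isIn "PLOG" (content.getD (i+1) "")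

def pvRk (content : List String) (k : Nat) : List Nat :=
  (List.range' k (content.length - k)).filter (pvFlag content)

def pvPk (content : List String) (k : Nat) : List Nat :=
  (pvRk content k).filter (pvPl content)

def pvFirst (content : List String) (k : Nat) : Nat :=
  (pvRk content k).headD content.length

def pvBlock (content : List String) (i : Nat) : List String :=
  PySem.List.slice content (some (i : Int)) (some ((pvFirst content (i+1) : Nat) : Int))

theorem pv_cond_eq (s : String) : pvIsReactionA s = PySem.Str.isIn "=" s := by
  unfold pvIsReactionA
  simp only [PySem.Str.isIn_eq]
  cases h : PySem.Chars.isIn "=".toList s.toList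
  · rw [PySem.Chars.isIn_eq_false_iff] at h
    have h1 : PySem.Chars.isIn "<=>".toList s.toList = false := by
      rw [PySem.Chars.isIn_eq_false_iff]
      intro hc; exact h ((by decide : ("=".toList) <:+: ("<=>".toList)).trans hc)
    have h2 : PySem.Chars.isIn "=>".toList s.toList = false := by
      rw [PySem.Chars.isIn_eq_false_iff]
      intro hc; exact h ((by decide : ("=".toList) <:+: ("=>".toList)).trans hc)
    simp_all [PySem.Chars.isIn_eq_false_iff]
  · simp

theorem pv_Rk_nil (content : List String) (k : Nat) (h : content.length ≤ k) :
    pvRk content k = [] := by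
  simp [pvRk, Nat.sub_eq_zero_of_le h]

theorem pv_Rk_cons (content : List String) (k : Nat) (h : k < content.length) :
    pvRk content k =
      if pvFlag content k then k :: pvRk content (k+1) else pvRk content (k+1) := by
  unfold pvRk
  rw [show content.length - k = (content.length - (k+1)) + 1 by omega, List.range'_succ,
    List.filter_cons]

theorem pv_drop_facts (content : List String) (k : Nat) (line : String) (rest : List String)
    (h : content.drop k = line :: rest) :
    k < content.length ∧ content.getD k "" = line ∧ content.drop (k+1) = rest := by
  have hlen := List.length_drop (l := content) (i := k)
  rw [h] at hlen
  have hk : k < content.length := by simp at hlen; omega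
  refine ⟨hk, ?_, ?_⟩
  · have h0 : (content.drop k)[0]? = content[k + 0]? := List.getElem?_drop
    rw [h] at h0
    simp at h0
    simp [List.getD_eq_getElem?_getD, ← h0]
  · have : content.drop (k+1) = (content.drop k).drop 1 := by
      rw [List.drop_drop]
    simp [this, h]

theorem pv_plogcond_eq (content : List String) (k : Nat) (h : k < content.length) :
    ((k != content.length - 1) &&
      PySem.Str.isIn "PLOG" ((PySem.List.pyGet? content ((k : Int) + 1)).getD "")) =
    pvPl content k := by
  have hb : (k != content.length - 1) = decide (k + 1 < content.length) := by
    by_cases hc : k + 1 < content.length <;> simp [hc] <;> omega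
  have hg : PySem.List.pyGet? content ((k : Int) + 1) = content[k+1]? := by
    rw [show ((k : Int) + 1) = ((k+1 : Nat) : Int) by push_cast; ring, PySem.List.pyGet?_natCast]
  rw [hb, hg, pvPl]
  by_cases hc : k + 1 < content.length
  · simp [hc, List.getD_eq_getElem?_getD]
  · simp [hc]

theorem pv_aLoop1_eq (content : List String) :
    ∀ (rest : List String) (k : Nat) (ir ipr : List Int), content.drop k = rest →
    pvALoop1 content content.length k rest (ir, ipr) =
      (ir ++ (pvRk content k).map (fun i : Nat => (i : Int)),
       ipr ++ (pvPk content k).map (fun i : Nat => (i : Int))) := by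
  intro rest
  induction rest with
  | nil =>
    intro k ir ipr h
    have hk : content.length ≤ k := by
      have := List.drop_eq_nil_iff.mp h
      omega
    simp [pvALoop1, pv_Rk_nil content k hk, pvPk]
  | cons line rest' ih =>
    intro k ir ipr h
    obtain ⟨hk, hline, hrest⟩ := pv_drop_facts content k line rest' h
    have hflag : pvIsReactionA line = pvFlag content k := by rw [pvFlag, hline]
    have hRk := pv_Rk_cons content k hk
    simp only [pvALoop1, hflag, pv_plogcond_eq content k hk]
    by_cases hf : pvFlag content k
    · rw [if_pos hf]
      rw [ih (k+1) _ _ hrest]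
      have hPk : pvPk content k =
          if pvPl content k then k :: pvPk content (k+1) else pvPk content (k+1) := by
        rw [pvPk, hRk, if_pos hf, List.filter_cons, pvPk]
      by_cases hp : pvPl content k
      · simp [hp, hRk, if_pos hf, hPk]
      · simp [hp, hRk, if_pos hf, hPk]
    · rw [if_neg hf]
      rw [ih (k+1) _ _ hrest]
      have hPk : pvPk content k = pvPk content (k+1) := by
        rw [pvPk, hRk, if_neg hf, pvPk]
      rw [hRk, if_neg hf, hPk]

theorem pv_sorted_R (content : List String) : (pvRk content 0).Pairwise (· < ·) := by
  exact List.Pairwise.sublist List.filter_sublist (List.pairwise_lt_range' ..)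

theorem pv_loop2_step (ir : List Int) (idx c : Int)
    (hs : ir.Pairwise (· < ·)) (hm : idx ∈ ir) :
    ∃ j, PySem.List.index? ir idx = some j ∧
      (if j + 1 < ir.length then (PySem.List.pyGet? ir ((j : Int) + 1)).getD 0 else c) =
        (ir.find? (fun x => decide (idx < x))).getD c := by
  induction ir with
  | nil => cases hm
  | cons a t ih =>
    by_cases ha : a = idx
    · subst ha
      refine ⟨0, PySem.List.index?_cons_self .., ?_⟩
      have hall := (List.pairwise_cons.mp hs).1
      cases t with
      | nil => simp
      | cons b t' =>
        have hb : a < b := hall b (by simp)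
        have hg1 : PySem.List.pyGet? (a :: b :: t') (((0:Nat) : Int) + 1) = some b := by
          rw [show ((0:Nat) : Int) + 1 = ((1 : Nat) : Int) by norm_num, PySem.List.pyGet?_natCast]
          rfl
        simp [hb]
    · have hmt : idx ∈ t := by
        rcases List.mem_cons.mp hm with h | h
        · exact absurd h.symm ha
        · exact h
      obtain ⟨j, hj, heq⟩ := ih (List.Pairwise.of_cons hs) hmt
      have halt : a < idx := (List.pairwise_cons.mp hs).1 idx hmt
      refine ⟨j + 1, ?_, ?_⟩
      · rw [PySem.List.index?_cons_of_ne t ha, hj]; rfl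
      · have hfind : (a :: t).find? (fun x => decide (idx < x)) =
            t.find? (fun x => decide (idx < x)) := by
          simp [not_lt_of_gt halt]
        rw [hfind, ← heq]
        have hget : PySem.List.pyGet? (a :: t) (((j+1 : Nat) : Int) + 1) =
            PySem.List.pyGet? t ((j : Nat) + 1) := by
          rw [show ((j+1 : Nat) : Int) + 1 = ((j + 2 : Nat) : Int) by push_cast; ring,
              show ((j : Nat) : Int) + 1 = ((j + 1 : Nat) : Int) by push_cast; ring,
              PySem.List.pyGet?_natCast, PySem.List.pyGet?_natCast]
          simp
        rw [hget]
        simp only [List.length_cons]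
        by_cases hcnd : j + 1 < t.length
        · rw [if_pos hcnd, if_pos (by omega)]
        · rw [if_neg hcnd, if_neg (by omega)]

theorem pv_aLoop2_eq (content : List String) (ir : List Int)
    (hs : ir.Pairwise (· < ·)) :
    ∀ (P : List Int) (acc : List (List String)), (∀ idx ∈ P, idx ∈ ir) →
    pvALoop2 content ir ir.length P acc =
      acc ++ P.map (fun idx => PySem.List.slice content (some idx)
        (some ((ir.find? (fun x => decide (idx < x))).getD (content.length : Int)))) := by
  intro P
  induction P with
  | nil => intro acc _; simp [pvALoop2]
  | cons idx restP ih =>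
    intro acc hmem
    obtain ⟨j, hj, heq⟩ := pv_loop2_step ir idx (content.length : Int) hs (hmem idx (by simp))
    rw [pvALoop2, hj]
    simp only
    rw [heq, ih _ (fun x hx => hmem x (by simp [hx]))]
    simp

theorem pv_find_gt (content : List String) (i : Nat) :
    (pvRk content 0).find? (fun j => decide (i < j)) = (pvRk content (i+1)).head? := by
  by_cases hn : i + 1 ≤ content.length
  · have hsplit : pvRk content 0 =
        (List.range' 0 (i+1)).filter (pvFlag content) ++ pvRk content (i+1) := by
      unfold pvRk
      rw [← List.filter_append]
      congr 1
      rw [show content.length - 0 = (i+1) + (content.length - (i+1)) by omega]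
      have h : List.range' 0 (i+1) ++ List.range' (0 + 1*(i+1)) (content.length - (i+1)) =
          List.range' 0 ((i+1) + (content.length - (i+1))) := List.range'_append ..
      simpa using h.symm
    rw [hsplit, List.find?_append]
    have h1 : ((List.range' 0 (i+1)).filter (pvFlag content)).find?
        (fun j => decide (i < j)) = none := by
      rw [List.find?_eq_none]
      intro x hx
      have := List.mem_range'_1.mp (List.mem_of_mem_filter hx)
      simp; omega
    have h2 : (pvRk content (i+1)).find? (fun j => decide (i < j)) =
        (pvRk content (i+1)).head? := by
      cases hR : pvRk content (i+1) with
      | nil => simp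
      | cons b t =>
        have hmem : b ∈ pvRk content (i+1) := by rw [hR]; simp
        have hb : i + 1 ≤ b := by
          unfold pvRk at hmem
          have := List.mem_range'_1.mp (List.mem_of_mem_filter hmem)
          omega
        simp [show i < b by omega]
    rw [h1, h2]
    simp
  · rw [pv_Rk_nil content (i+1) (by omega)]
    rw [show ([] : List Nat).head? = none from rfl, List.find?_eq_none]
    intro x hx
    have hmem : x ∈ List.range' 0 (content.length - 0) := List.mem_of_mem_filter hx
    have := List.mem_range'_1.mp hmem
    simp; omega

def pvPendClose (content : List String) (pend : Option Nat) (e : Nat) : List (List String) :=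
  match pend with
  | some s => [PySem.List.slice content (some (s : Int)) (some (e : Int))]
  | none => []

def pvPost (content : List String)
    (st : List (List String) × List Int × List Int × Option Nat) :
    List (List String) × List Int × List Int :=
  (st.1 ++ pvPendClose content st.2.2.2 content.length, st.2.1, st.2.2.1)

theorem pv_bLoop_eq (content : List String) :
    ∀ (rest : List String) (k : Nat) (bs : List (List String)) (ipr ir : List Int)
      (pend : Option Nat), content.drop k = rest →
    pvPost content (pvBLoop content content.length k rest (bs, ipr, ir, pend)) =
      (bs ++ pvPendClose content pend (pvFirst content k)
          ++ (pvPk content k).map (pvBlock content),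
       ipr ++ (pvPk content k).map (fun i : Nat => (i : Int)),
       ir ++ (pvRk content k).map (fun i : Nat => (i : Int))) := by
  intro rest
  induction rest with
  | nil =>
    intro k bs ipr ir pend h
    have hk : content.length ≤ k := by
      have := List.drop_eq_nil_iff.mp h
      omega
    have hF : pvFirst content k = content.length := by
      rw [pvFirst, pv_Rk_nil content k hk]; rfl
    simp [pvBLoop, pvPost, pv_Rk_nil content k hk, pvPk, hF]
  | cons line rest' ih =>
    intro k bs ipr ir pend h
    obtain ⟨hk, hline, hrest⟩ := pv_drop_facts content k line rest' h
    have hflag : PySem.Str.isIn "=" line = pvFlag content k := by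
      rw [pvFlag, hline, pv_cond_eq]
    have hRk := pv_Rk_cons content k hk
    simp only [pvBLoop, hflag, pv_plogcond_eq content k hk]
    by_cases hf : pvFlag content k
    · rw [if_pos hf]
      have hF : pvFirst content k = k := by rw [pvFirst, hRk, if_pos hf]; rfl
      have hPk : pvPk content k =
          if pvPl content k then k :: pvPk content (k+1) else pvPk content (k+1) := by
        rw [pvPk, hRk, if_pos hf, List.filter_cons, pvPk]
      by_cases hp : pvPl content k
      · rw [if_pos hp, ih (k+1) _ _ _ _ hrest]
        rw [hRk, if_pos hf, hPk, if_pos hp, hF]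
        cases pend <;>
          simp [pvPendClose, pvBlock, List.append_assoc]
      · rw [if_neg hp, ih (k+1) _ _ _ _ hrest]
        rw [hRk, if_pos hf, hPk, if_neg hp, hF]
        cases pend <;>
          simp [pvPendClose, List.append_assoc]
    · rw [if_neg hf]
      rw [ih (k+1) _ _ _ _ hrest]
      have hF : pvFirst content k = pvFirst content (k+1) := by
        rw [pvFirst, hRk, if_neg hf, pvFirst]
      have hPk : pvPk content k = pvPk content (k+1) := by
        rw [pvPk, hRk, if_neg hf, pvPk]
      rw [hRk, if_neg hf, hPk, hF]

-- ===== VERDICT (by name: the statement is the Claim_ definition above) =====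
theorem pv_castmap_pairwise (R : List Nat) (h : R.Pairwise (· < ·)) :
    (R.map (fun i : Nat => (i : Int))).Pairwise (· < ·) := by
  rw [List.pairwise_map]
  exact h.imp (by intro a b hab; exact_mod_cast hab)

theorem pv_block_cast (content : List String) (i : Nat) :
    PySem.List.slice content (some ((i : Nat) : Int))
      (some (((pvRk content 0).map (fun j : Nat => (j : Int))).find?
          (fun x => decide (((i : Nat) : Int) < x)) |>.getD (content.length : Int))) =
      pvBlock content i := by
  have hmapfind : ((pvRk content 0).map (fun j : Nat => (j : Int))).find?
      (fun x => decide (((i : Nat) : Int) < x)) =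
      ((pvRk content 0).find? (fun j => decide (i < j))).map (fun j : Nat => (j : Int)) := by
    rw [List.find?_map]
    have hfun : ((fun x => decide (((i : Nat) : Int) < x)) ∘ fun j : Nat => (j : Int)) =
        (fun j : Nat => decide (i < j)) := by
      funext j
      simp
    rw [hfun]
  rw [hmapfind, pv_find_gt content i, pvBlock, pvFirst]
  cases hR : (pvRk content (i+1)) with
  | nil => simp
  | cons b t => simp

theorem identify_plog_reactions_spec : Claim_equal_identify_plog_reactions := by
  intro content _
  unfold Spec_identify_plog_reactions identify_plog_reactions identify_plog_reactions_alt
  have hA := pv_aLoop1_eq content content 0 [] [] (by simp)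
  simp only [List.nil_append] at hA
  have hsort := pv_castmap_pairwise _ (pv_sorted_R content)
  have hmem : ∀ idx ∈ (pvPk content 0).map (fun i : Nat => (i : Int)),
      idx ∈ (pvRk content 0).map (fun i : Nat => (i : Int)) := by
    intro idx hidx
    obtain ⟨i, hi, rfl⟩ := List.mem_map.mp hidx
    exact List.mem_map_of_mem (List.mem_of_mem_filter hi)
  have hA2 := pv_aLoop2_eq content ((pvRk content 0).map (fun i : Nat => (i : Int))) hsort
      ((pvPk content 0).map (fun i : Nat => (i : Int))) [] hmem
  simp only [List.nil_append] at hA2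
  have hB := pv_bLoop_eq content content 0 [] [] [] none (by simp)
  simp only [List.nil_append] at hB
  have hPend0 : pvPendClose content none (pvFirst content 0) = [] := rfl
  rw [hPend0, List.nil_append] at hB
  have h1 : (pvBLoop content content.length 0 content ([], [], [], none)).1 ++
      pvPendClose content (pvBLoop content content.length 0 content ([], [], [], none)).2.2.2
        content.length = (pvPk content 0).map (pvBlock content) :=
    congrArg (fun t => t.1) hB
  have h2 : (pvBLoop content content.length 0 content ([], [], [], none)).2.1 =
      (pvPk content 0).map (fun i : Nat => (i : Int)) := congrArg (fun t => t.2.1) hB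
  have h3 : (pvBLoop content content.length 0 content ([], [], [], none)).2.2.1 =
      (pvRk content 0).map (fun i : Nat => (i : Int)) := congrArg (fun t => t.2.2) hB
  simp only [hA, hA2]
  show _ = ((pvBLoop content content.length 0 content ([], [], [], none)).1 ++
      pvPendClose content (pvBLoop content content.length 0 content ([], [], [], none)).2.2.2
        content.length, _, _, _)
  rw [h1, h2, h3]
  refine Prod.ext ?_ rfl
  simp only [List.map_map]
  congr 1
  funext i
  exact pv_block_cast content i
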